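-- pv_equiv track=rewrite | github.com/jossemii/HyperNode | src/database/sql_connection.py | _split_gas
-- ===== SOURCE A (Python) =====
-- from typing import Callable, Dict, Generator, List, Tuple, Optional
--
-- MAX_MANTISSA = 10**3  # Adjust this limit as needed
--
-- MAX_EXPONENT = 1024  # Adjust this limit as needed
--
-- def _split_gas(gas: int) -> Tuple[int, int]:
--     """
--     Splits a gas amount into mantissa and exponent.
--
--     Args:
--         gas (int): The gas amount.
--
--     Returns:
--         Tuple[int, int]: The mantissa and exponent.
--     """
--     exponent = 0
--     while gas >= MAX_MANTISSA and exponent < MAX_EXPONENT: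
--         gas //= 10
--         exponent += 1
--
--     # Ensure the mantissa is within range
--     if gas > MAX_MANTISSA:
--         raise ValueError(f"Splitted mantissa {gas} is out of acceptable range (0 to {MAX_MANTISSA})")
--
--     return gas, exponent
-- ===== SOURCE B (Python) =====
-- MAX_MANTISSA = 10**3  # Adjust this limit as needed
--
-- MAX_EXPONENT = 1024  # Adjust this limit as needed
--
-- def _split_gas(gas: int):
--     """Split gas into mantissa and exponent: closed-form exponent from the digit
--     count plus one floor division, instead of a divide-by-10 loop."""
--     if gas < MAX_MANTISSA:
--         return gas, 0
--     exponent = min(len(str(gas)) - 3, MAX_EXPONENT)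
--     mantissa = gas // 10 ** exponent
--     if mantissa > MAX_MANTISSA:
--         raise ValueError(f"Splitted mantissa {mantissa} is out of acceptable range (0 to {MAX_MANTISSA})")
--     return mantissa, exponent
-- ===== Notes on version B (the rewrite author's own statement) =====
-- stated objective: simpler
-- what changed: Replaces the divide-by-ten loop with a closed-form exponent derived from the decimal digit count (clamped to MAX_EXPONENT) and a single floor division.
import Mathlib
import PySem

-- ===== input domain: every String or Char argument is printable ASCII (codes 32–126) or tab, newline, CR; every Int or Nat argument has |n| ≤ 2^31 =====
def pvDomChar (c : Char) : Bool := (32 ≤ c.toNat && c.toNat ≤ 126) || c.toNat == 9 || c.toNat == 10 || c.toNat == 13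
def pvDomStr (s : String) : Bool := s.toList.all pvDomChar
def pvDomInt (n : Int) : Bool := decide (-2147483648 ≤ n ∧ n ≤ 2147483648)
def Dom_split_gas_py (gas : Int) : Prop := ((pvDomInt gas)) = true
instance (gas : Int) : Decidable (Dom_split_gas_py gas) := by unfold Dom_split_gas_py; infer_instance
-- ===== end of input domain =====

-- B replaces A's divide-by-10 loop by a closed-form exponent from the decimal digit count plus one floor division (simpler).


-- ===== PORT A =====
-- the while loop: gas //= 10; exponent += 1 while gas >= MAX_MANTISSA and exponent < MAX_EXPONENT
def splitGasLoop (gas : Int) (exponent : Int) : Int × Int :=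
  if h : 1000 ≤ gas ∧ exponent < 1024 then
    splitGasLoop (PySem.Int.floordiv gas 10) (exponent + 1)
  else (gas, exponent)
termination_by gas.toNat
decreasing_by
  rw [PySem.Int.floordiv_eq_ediv_of_pos (by norm_num : (0:Int) < 10)]
  omega

def split_gas_py (gas : Int) : Int × Int :=
  let p := splitGasLoop gas 0
  if p.1 > 1000 then p   -- `raise ValueError(...)`: these inputs are excluded by Pre_split_gas_py
  else p

-- ===== PORT B =====
def split_gas_py_alt (gas : Int) : Int × Int :=
  if gas < 1000 then (gas, 0)
  else
    let exponent : Int := min (((PySem.Int.toChars gas).length : Int) - 3) 1024   -- len(str(gas)) - 3, clamped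
    let mantissa : Int := PySem.Int.floordiv gas (10 ^ exponent.toNat)
    if mantissa > 1000 then (mantissa, exponent)   -- `raise ValueError(...)`: excluded by Pre_split_gas_py
    else (mantissa, exponent)

-- ===== PRECONDITION & SPEC =====
-- Pre_ excludes exactly the inputs where A raises ValueError (gas ≥ 1001·10^1024, far outside Dom); B raises there too.
def Pre_split_gas_py (gas : Int) : Prop := gas < 10010000000000000000000000000000000000000000000000000000000000000000000000000000000000000000000000000000000000000000000000000000000000000000000000000000000000000000000000000000000000000000000000000000000000000000000000000000000000000000000000000000000000000000000000000000000000000000000000000000000000000000000000000000000000000000000000000000000000000000000000000000000000000000000000000000000000000000000000000000000000000000000000000000000000000000000000000000000000000000000000000000000000000000000000000000000000000000000000000000000000000000000000000000000000000000000000000000000000000000000000000000000000000000000000000000000000000000000000000000000000000000000000000000000000000000000000000000000000000000000000000000000000000000000000000000000000000000000000000000000000000000000000000000000000000000000000000000000000000000000000000000000000000000000000000000000000000000000000000000000000000000000000000000000000000000000000000000000000000000000000000000000000000000000000000000000000000000000000000000000000000000  -- = 1001 * 10 ^ 1024, written as a literal so `decide` reduces it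
instance (gas : Int) : Decidable (Pre_split_gas_py gas) := by unfold Pre_split_gas_py; infer_instance
def pvWitness_split_gas_py : Int := 123456
def Spec_split_gas_py (gas : Int) (out : Int × Int) : Prop := out = split_gas_py_alt gas
instance (gas : Int) (out : Int × Int) : Decidable (Spec_split_gas_py gas out) := by unfold Spec_split_gas_py; infer_instance

-- ===== CLAIM (what is proved, stated in full; the proofs are below) =====
def Claim_equal_split_gas_py : Prop := ∀ (gas : Int), Dom_split_gas_py gas → Pre_split_gas_py gas → Spec_split_gas_py gas (split_gas_py gas)

-- ===== LEMMAS AND PROOFS =====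

-- exact length of Nat.toDigits (Mathlib only has the upper bound Nat.toDigits_length)
lemma toDigitsCore_length_eq (b : Nat) (hb : 2 ≤ b) :
    ∀ (f n : Nat) (l : List Char), n < b ^ f → 0 < f →
      (Nat.toDigitsCore b f n l).length = Nat.log b n + 1 + l.length := by
  intro f
  induction f with
  | zero => intro n l h hf; omega
  | succ f ih =>
    intro n l h _
    rw [Nat.toDigitsCore]
    by_cases hz : n / b = 0
    · have hnb : n < b := by
        rcases Nat.lt_or_ge n b with h' | h'
        · exact h'
        · exact absurd hz (by have := Nat.div_pos h' (by omega); omega)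
      have hlog : Nat.log b n = 0 := Nat.log_eq_zero_iff.mpr (Or.inl hnb)
      simp [hz, hlog]
      omega
    · have hnb : b ≤ n := by
        by_contra hc
        exact hz (Nat.div_eq_of_lt (by omega))
      rw [if_neg hz]
      have hf : 0 < f := by
        rcases Nat.eq_zero_or_pos f with rfl | hf
        · rw [pow_one] at h; omega
        · exact hf
      have hlt : n / b < b ^ f := by
        rw [Nat.div_lt_iff_lt_mul (by omega)]
        calc n < b ^ (f + 1) := h
        _ = b ^ f * b := by ring
      rw [ih (n / b) _ hlt hf]
      have hlog : Nat.log b n = Nat.log b (n / b) + 1 := by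
        have := Nat.log_div_base b n
        have hpos : 0 < Nat.log b n := Nat.log_pos (by omega) hnb
        omega
      rw [hlog]
      simp only [List.length_cons]
      omega

lemma toDigits_length_eq (n : Nat) : (Nat.toDigits 10 n).length = Nat.log 10 n + 1 := by
  have h : n < 10 ^ (n + 1) := by
    calc n < 2 ^ n := Nat.lt_two_pow_self
    _ ≤ 10 ^ n := Nat.pow_le_pow_left (by omega) n
    _ ≤ 10 ^ (n + 1) := Nat.pow_le_pow_right (by omega) (by omega)
  simpa using toDigitsCore_length_eq 10 (by omega) (n + 1) n [] h (by omega)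

-- characterisation of A's loop for g ≥ 1000 with enough headroom below the exponent cap
lemma splitGasLoop_eq (g : Nat) (hg : 1000 ≤ g) :
    ∀ (e : Nat), e + Nat.log 10 g ≤ 1024 →
      splitGasLoop (g : Int) (e : Int) =
        (((g / 10 ^ (Nat.log 10 g - 2) : Nat) : Int), (((e + (Nat.log 10 g - 2)) : Nat) : Int)) := by
  induction g using Nat.strong_induction_on with
  | _ g ih =>
    intro e he
    have hlog3 : 3 ≤ Nat.log 10 g := by
      rw [Nat.le_log_iff_pow_le (by omega) (by omega)]
      exact_mod_cast hg
    rw [splitGasLoop, dif_pos ⟨by exact_mod_cast hg, by exact_mod_cast (by omega : (e:Int) < 1024)⟩]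
    rw [PySem.Int.floordiv_eq_ediv_of_pos (by norm_num : (0:Int) < 10)]
    have hdiv : (g : Int) / 10 = ((g / 10 : Nat) : Int) := (Int.natCast_div g 10).symm
    rw [hdiv]
    by_cases hge : 1000 ≤ g / 10
    · have hlog10 : Nat.log 10 (g / 10) = Nat.log 10 g - 1 := Nat.log_div_base 10 g
      have hlog4 : 4 ≤ Nat.log 10 g := by
        rw [Nat.le_log_iff_pow_le (by omega) (by omega)]
        have : (10:Nat) ^ 4 = 10000 := by norm_num
        rw [this]
        omega
      have := ih (g / 10) (by omega) hge (e + 1) (by omega)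
      rw [(by push_cast; ring : ((e:Int) + 1) = (((e + 1 : Nat)) : Int))]
      rw [this]
      have hdd : g / 10 / 10 ^ (Nat.log 10 (g / 10) - 2) = g / 10 ^ (Nat.log 10 g - 2) := by
        rw [Nat.div_div_eq_div_mul, hlog10]
        congr 1
        rw [← pow_succ']
        congr 1
        omega
      rw [hdd]
      congr 1
      congr 1
      omega
    · -- g / 10 < 1000, so 1000 ≤ g < 10000 and log 10 g = 3
      have hub : g < 10000 := by
        by_contra hc
        exact hge (by omega : 1000 ≤ g / 10)
      have hlog : Nat.log 10 g = 3 := by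
        apply Nat.log_eq_of_pow_le_of_lt_pow <;> norm_num <;> omega
      rw [splitGasLoop, dif_neg (by push_neg; intro hc; exact absurd (by exact_mod_cast hc : (1000:Nat) ≤ g / 10) hge)]
      rw [hlog]
      norm_num

-- ===== VERDICT (by name: the statement is the Claim_ definition above) =====
theorem split_gas_py_spec : Claim_equal_split_gas_py := by
  intro gas hdom hpre
  unfold Spec_split_gas_py split_gas_py split_gas_py_alt
  have hdom' : -2147483648 ≤ gas ∧ gas ≤ 2147483648 := by
    simpa [Dom_split_gas_py, pvDomInt] using hdom
  simp only [ite_self]   -- both ValueError guards return the same pair as the normal path in the ports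
  by_cases hlt : gas < 1000
  · rw [splitGasLoop, dif_neg (by omega), if_pos hlt]
  · push_neg at hlt
    rw [if_neg (by omega)]
    set g : Nat := gas.toNat with hgdef
    have hgas : gas = (g : Int) := by omega
    have hg1000 : 1000 ≤ g := by omega
    have hgub : g < 10 ^ 10 := by omega
    set L : Nat := Nat.log 10 g with hLdef
    have hL3 : 3 ≤ L := by
      rw [hLdef, Nat.le_log_iff_pow_le (by omega) (by omega)]
      exact_mod_cast hg1000
    have hL9 : L < 10 := by
      rw [hLdef]
      exact Nat.log_lt_of_lt_pow (by omega) hgub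
    have hmlt : g / 10 ^ (L - 2) < 1000 := by
      rw [Nat.div_lt_iff_lt_mul (by positivity)]
      calc g < 10 ^ (L + 1) := Nat.lt_pow_succ_log_self (by omega) g
      _ ≤ 1000 * 10 ^ (L - 2) := by
          rw [(by norm_num : (1000:Nat) = 10 ^ 3), ← pow_add]
          apply Nat.pow_le_pow_right (by omega)
          omega
    have hloop := splitGasLoop_eq g hg1000 0 (by omega)
    simp only [Nat.cast_zero, Nat.zero_add] at hloop
    rw [hgas, hloop]
    have hchars : (PySem.Int.toChars (g : Int)).length = L + 1 := by
      simp only [PySem.Int.toChars, if_neg (by omega : ¬ ((g:Int) < 0))]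
      rw [Int.toNat_natCast, toDigits_length_eq]
    rw [hchars]
    have hexp : min (((L + 1 : Nat) : Int) - 3) 1024 = ((L - 2 : Nat) : Int) := by
      push_cast [Nat.cast_sub (by omega : 2 ≤ L)]
      omega
    push_cast at hexp ⊢
    rw [hexp]
    have htn : (((L - 2 : Nat) : Int)).toNat = L - 2 := by omega
    push_cast at htn
    rw [htn]
    have hfd : PySem.Int.floordiv (g : Int) (10 ^ (L - 2)) = ((g / 10 ^ (L - 2) : Nat) : Int) := by
      rw [PySem.Int.floordiv_eq_ediv_of_pos (by positivity)]
      exact_mod_cast (Int.natCast_div g (10 ^ (L - 2))).symm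
    rw [hfd, ← hLdef]
    simp only [Prod.mk.injEq]
    exact ⟨by exact_mod_cast (Int.natCast_div g (10 ^ (L - 2))).symm, trivial⟩
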